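-- pv_equiv track=rewrite | github.com/ZaruFox/Advent-of-Code | 2016/14/2.py | findRecurringValues
-- ===== SOURCE A (Python) =====
-- def findRecurringValues(string, recurringTarget):
--     count = 1
--     for i in range(1, len(string)):
--         if string[i] == string[i-1]:
--             count += 1
--
--             if count == recurringTarget:
--                 return string[i]
--         else:
--             count = 1
--
--     return ""
-- ===== SOURCE B (Python) =====
-- def findRecurringValues(string, recurringTarget):
--     if recurringTarget < 2:
--         return ""
--     t = recurringTarget
--     for i in range(t - 1, len(string)):
--         if string[i - t + 1 : i + 1] == string[i] * t:
--             return string[i]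
--     return ""
-- ===== Notes on version B (the rewrite author's own statement) =====
-- stated objective: alternative
-- what changed: Replaces A's running-counter state machine with a fixed-width sliding-window test: for each index i >= t-1 it compares the length-t slice ending at i against the character repeated t times, returning the first match; no run length or counter state is maintained.
import Mathlib
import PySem

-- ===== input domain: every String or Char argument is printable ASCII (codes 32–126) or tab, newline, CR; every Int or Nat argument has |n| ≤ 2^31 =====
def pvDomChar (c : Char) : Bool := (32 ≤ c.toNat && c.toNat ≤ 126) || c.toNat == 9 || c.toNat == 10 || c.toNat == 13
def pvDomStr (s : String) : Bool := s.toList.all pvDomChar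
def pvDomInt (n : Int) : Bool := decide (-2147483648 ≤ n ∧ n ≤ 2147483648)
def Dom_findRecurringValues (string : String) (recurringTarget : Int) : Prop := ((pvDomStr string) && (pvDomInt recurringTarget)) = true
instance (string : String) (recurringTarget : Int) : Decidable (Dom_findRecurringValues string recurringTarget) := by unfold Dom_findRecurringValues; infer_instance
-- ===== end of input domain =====

-- B replaces A's running-counter state machine with a stateless fixed-width sliding-window
-- test (compare the length-t slice ending at each index with the character repeated t times).

-- ===== PORT A =====
-- A's for-loop over range(1, len(string)) with early return, as structural recursion on the index.
def findRecurringValuesGoA (cs : List Char) (target : Int) (i : Nat) (count : Int) : String :=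
  if i < cs.length then
    if cs.getD i ' ' == cs.getD (i - 1) ' ' then
      if count + 1 = target then String.ofList [cs.getD i ' ']
      else findRecurringValuesGoA cs target (i + 1) (count + 1)
    else findRecurringValuesGoA cs target (i + 1) 1
  else ""
termination_by cs.length - i

def findRecurringValues (string : String) (recurringTarget : Int) : String :=
  findRecurringValuesGoA string.toList recurringTarget 1 1

-- ===== PORT B =====
-- Source B's loop 'for i in range(t-1, len(string))' with early return on the window test
-- 'string[i-t+1:i+1] == string[i]*t' (slice via PySem.List.slice; 'string[i]*t' is
-- List.replicate t.toNat, exact since the loop only runs with t ≥ 2).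
def findRecurringValuesGoB (cs : List Char) (t : Int) (i : Nat) : String :=
  if i < cs.length then
    if PySem.List.slice cs (some ((i : Int) - t + 1)) (some ((i : Int) + 1))
        = List.replicate t.toNat (cs.getD i ' ')
    then String.ofList [cs.getD i ' ']
    else findRecurringValuesGoB cs t (i + 1)
  else ""
termination_by cs.length - i

def findRecurringValues_alt (string : String) (recurringTarget : Int) : String :=
  if recurringTarget < 2 then ""
  else findRecurringValuesGoB string.toList recurringTarget (recurringTarget.toNat - 1)

-- ===== PRECONDITION & SPEC =====
def Spec_findRecurringValues (string : String) (recurringTarget : Int) (out : String) : Prop := out = findRecurringValues_alt string recurringTarget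
instance (string : String) (recurringTarget : Int) (out : String) : Decidable (Spec_findRecurringValues string recurringTarget out) := by unfold Spec_findRecurringValues; infer_instance

-- ===== CLAIM (what is proved, stated in full; the proofs are below) =====
def Claim_equal_findRecurringValues : Prop := ∀ (string : String) (recurringTarget : Int), Dom_findRecurringValues string recurringTarget → Spec_findRecurringValues string recurringTarget (findRecurringValues string recurringTarget)

-- ===== LEMMAS AND PROOFS =====

-- length of the maximal run of equal characters ending at index i
def pvRunLen (cs : List Char) : Nat → Nat
  | 0 => 1
  | i + 1 => if cs.getD (i + 1) ' ' == cs.getD i ' ' then pvRunLen cs i + 1 else 1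

theorem pvRunLen_pos (cs : List Char) (i : Nat) : 1 ≤ pvRunLen cs i := by
  cases i with
  | zero => simp [pvRunLen]
  | succ i => unfold pvRunLen; split <;> omega

theorem pvRunLen_succ (cs : List Char) (i : Nat) :
    pvRunLen cs (i + 1) = if cs.getD (i + 1) ' ' == cs.getD i ' ' then pvRunLen cs i + 1 else 1 :=
  rfl

theorem pvRunLen_le (cs : List Char) (i : Nat) : pvRunLen cs i ≤ i + 1 := by
  induction i with
  | zero => simp [pvRunLen]
  | succ i ih => unfold pvRunLen; split <;> omega

-- all characters in the run ending at i equal cs[i]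
theorem pvRunLen_run (cs : List Char) (i : Nat) :
    ∀ m, i + 1 - pvRunLen cs i ≤ m → m ≤ i → cs.getD m ' ' = cs.getD i ' ' := by
  induction i with
  | zero => intro m h1 h2; rw [show m = 0 by omega]
  | succ i ih =>
      intro m h1 h2
      unfold pvRunLen at h1
      by_cases heq : cs.getD (i + 1) ' ' == cs.getD i ' '
      · rw [if_pos heq] at h1
        rcases Nat.lt_or_ge m (i + 1) with h | h
        · rw [ih m (by omega) (by omega)]
          exact (beq_iff_eq.mp heq).symm
        · rw [show m = i + 1 by omega]
      · rw [if_neg heq] at h1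
        rw [show m = i + 1 by omega]

-- converse: a block of k equal characters ending at i forces pvRunLen cs i ≥ k
theorem pvRunLen_ge (cs : List Char) (i : Nat) :
    ∀ k, k ≤ i + 1 → (∀ m, i + 1 - k ≤ m → m ≤ i → cs.getD m ' ' = cs.getD i ' ') →
      k ≤ pvRunLen cs i := by
  induction i with
  | zero => intro k hk _; have := pvRunLen_pos cs 0; omega
  | succ i ih =>
      intro k hk hall
      rcases Nat.lt_or_ge k 2 with h | h
      · have := pvRunLen_pos cs (i + 1); omega
      · have heq : cs.getD i ' ' = cs.getD (i + 1) ' ' :=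
          hall i (by omega) (by omega)
        have : k - 1 ≤ pvRunLen cs i := by
          refine ih (k - 1) (by omega) ?_
          intro m h1 h2
          rw [hall m (by omega) (by omega), heq]
        unfold pvRunLen
        rw [if_pos (beq_iff_eq.mpr heq.symm)]
        omega

-- the window test of B is exactly 'pvRunLen cs i >= t.toNat' (for 2 ≤ t, i in range)
theorem window_iff (cs : List Char) (t : Int) (i : Nat) (ht : 2 ≤ t)
    (hi : i < cs.length) (hti : t.toNat ≤ i + 1) :
    (PySem.List.slice cs (some ((i : Int) - t + 1)) (some ((i : Int) + 1))
        = List.replicate t.toNat (cs.getD i ' '))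
      ↔ t.toNat ≤ pvRunLen cs i := by
  have ha : (0 : Int) ≤ (i : Int) - t + 1 := by omega
  have hb : (0 : Int) ≤ (i : Int) + 1 := by omega
  have ha' : ((i : Int) - t + 1).toNat = i + 1 - t.toNat := by omega
  have hb' : ((i : Int) + 1).toNat = i + 1 := by omega
  rw [PySem.List.slice_toNat cs ha hb, ha', hb']
  set a := i + 1 - t.toNat with hadef
  have hget : ∀ m, m < i + 1 - a →
      (List.take (i + 1 - a) (List.drop a cs)).getD m ' ' = cs.getD (a + m) ' ' := by
    intro m hm
    rw [List.getD_eq_getElem?_getD, List.getD_eq_getElem?_getD,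
      List.getElem?_take_of_lt hm, List.getElem?_drop]
  constructor
  · intro hrepl
    refine pvRunLen_ge cs i t.toNat (by omega) ?_
    intro m h1 h2
    have hm : m - a < i + 1 - a := by omega
    have hgm := hget (m - a) hm
    rw [show a + (m - a) = m by omega] at hgm
    rw [← hgm, hrepl, List.getD_eq_getElem?_getD, List.getElem?_replicate]
    rw [if_pos (by omega : m - a < t.toNat)]
    rfl
  · intro hrun
    rw [List.eq_replicate_iff]
    constructor
    · simp; omega
    · intro b hb
      obtain ⟨n, hn, rfl⟩ := List.mem_iff_getElem.mp hb
      have hlt' : n < i + 1 - a := by simp at hn; omega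
      have h4 := hget n hlt'
      rw [List.getD_eq_getElem?_getD, List.getElem?_eq_getElem hn, Option.getD_some] at h4
      rw [h4]
      exact pvRunLen_run cs i (a + n) (by omega) (by omega)

-- common specification scan: first index j ≥ i whose ending run has length ≥ t
def pvGoS (cs : List Char) (t : Int) (i : Nat) : String :=
  if i < cs.length then
    if t.toNat ≤ pvRunLen cs i then String.ofList [cs.getD i ' ']
    else pvGoS cs t (i + 1)
  else ""
termination_by cs.length - i

-- A's counter walk equals the spec scan (count carries the run length ending at i-1)
theorem goA_eq_goS (cs : List Char) (t : Int) (ht : 2 ≤ t) :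
    ∀ n i, cs.length - i ≤ n → 1 ≤ i →
      (pvRunLen cs (i - 1) : Int) < t →
      findRecurringValuesGoA cs t i (pvRunLen cs (i - 1)) = pvGoS cs t i := by
  intro n
  induction n with
  | zero =>
      intro i hn hi hlt
      rw [findRecurringValuesGoA, if_neg (by omega), pvGoS, if_neg (by omega)]
  | succ n ih =>
      intro i hn hi hlt
      by_cases h : i < cs.length
      · obtain ⟨j, rfl⟩ : ∃ j, i = j + 1 := ⟨i - 1, by omega⟩
        rw [findRecurringValuesGoA, if_pos h, pvGoS, if_pos h]
        simp only [Nat.add_sub_cancel] at hlt ⊢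
        by_cases heq : cs.getD (j + 1) ' ' == cs.getD j ' '
        · rw [if_pos heq]
          have hrl : pvRunLen cs (j + 1) = pvRunLen cs j + 1 := by
            rw [pvRunLen_succ, if_pos heq]
          by_cases hfire : (pvRunLen cs j : Int) + 1 = t
          · rw [if_pos hfire, if_pos (by omega)]
          · rw [if_neg hfire, if_neg (by omega)]
            have hcast : (pvRunLen cs j : Int) + 1 = ((pvRunLen cs (j + 1) : Nat) : Int) := by
              rw [hrl]; push_cast; ring
            rw [hcast]
            exact ih (j + 2) (by omega) (by omega)
              (by rw [show j + 2 - 1 = j + 1 from rfl, hrl]; push_cast; omega)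
        · rw [if_neg heq]
          have hrl : pvRunLen cs (j + 1) = 1 := by rw [pvRunLen_succ, if_neg heq]
          rw [if_neg (by omega)]
          rw [show (1 : Int) = ((pvRunLen cs (j + 1) : Nat) : Int) by simp [hrl]]
          exact ih (j + 2) (by omega) (by omega)
            (by rw [show j + 2 - 1 = j + 1 from rfl, hrl]; omega)
      · rw [findRecurringValuesGoA, if_neg h, pvGoS, if_neg h]

-- B's window scan equals the spec scan on indices ≥ t.toNat - 1
theorem goB_eq_goS (cs : List Char) (t : Int) (ht : 2 ≤ t) :
    ∀ n i, cs.length - i ≤ n → t.toNat ≤ i + 1 →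
      findRecurringValuesGoB cs t i = pvGoS cs t i := by
  intro n
  induction n with
  | zero =>
      intro i hn hti
      rw [findRecurringValuesGoB, if_neg (by omega), pvGoS, if_neg (by omega)]
  | succ n ih =>
      intro i hn hti
      by_cases h : i < cs.length
      · rw [findRecurringValuesGoB, if_pos h, pvGoS, if_pos h]
        by_cases hw : t.toNat ≤ pvRunLen cs i
        · rw [if_pos ((window_iff cs t i ht h hti).mpr hw), if_pos hw]
        · rw [if_neg (by
              intro hc; exact hw ((window_iff cs t i ht h hti).mp hc)),
            if_neg hw]
          exact ih (i + 1) (by omega) (by omega)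
      · rw [findRecurringValuesGoB, if_neg h, pvGoS, if_neg h]

-- the spec scan skips indices whose run is necessarily too short (pvRunLen ≤ j+1 < t)
theorem goS_skip (cs : List Char) (t : Int) :
    ∀ (i j : Nat), i ≤ j → ((j : Int) + 1 ≤ t) → pvGoS cs t i = pvGoS cs t j := by
  intro i j
  induction j with
  | zero => intro hij _; rw [show i = 0 by omega]
  | succ j ih =>
      intro hij hjt
      rcases Nat.eq_or_lt_of_le hij with h | h
      · rw [h]
      · rw [ih (by omega) (by push_cast at hjt ⊢; omega)]
        rw [pvGoS]
        by_cases h2 : j < cs.length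
        · rw [if_pos h2,
            if_neg (by have := pvRunLen_le cs j; push_cast at hjt; omega)]
        · rw [if_neg h2, pvGoS, if_neg (by omega)]

-- if t < 2, A never returns a character (count+1 ≥ 2 on every check)
theorem goA_small (cs : List Char) (target : Int) (htar : target < 2)
    (i : Nat) (count : Int) (hc : 1 ≤ count) : findRecurringValuesGoA cs target i count = "" := by
  fun_induction findRecurringValuesGoA cs target i count with
  | case1 i count h1 h2 h3 => omega
  | case2 i count h1 h2 h3 ih => exact ih (by omega)
  | case3 i count h1 h2 ih => exact ih (by omega)
  | case4 i count h => rfl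

-- ===== VERDICT (by name: the statement is the Claim_ definition above) =====
theorem findRecurringValues_spec : Claim_equal_findRecurringValues := by
  intro s t _
  unfold Spec_findRecurringValues findRecurringValues findRecurringValues_alt
  by_cases h : t < 2
  · simp [h, goA_small s.toList t h 1 1 le_rfl]
  · rw [if_neg h]
    have ht : 2 ≤ t := by omega
    rcases Nat.eq_zero_or_pos s.toList.length with h0 | h0
    · rw [findRecurringValuesGoA, if_neg (by omega), goB_eq_goS s.toList t ht s.toList.length _ (by omega) (by omega),
        pvGoS, if_neg (by omega)]
    · have h1 : (1 : Int) = ((pvRunLen s.toList ((1 : Nat) - 1) : Nat) : Int) := by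
        simp [pvRunLen]
      rw [h1, goA_eq_goS s.toList t ht s.toList.length 1 (by omega) le_rfl (by simp [pvRunLen]; omega),
        goB_eq_goS s.toList t ht s.toList.length _ (by omega) (by omega),
        goS_skip s.toList t 1 (t.toNat - 1) (by omega) (by omega)]
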